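-- pv_equiv track=rewrite | github.com/JonasLow/CS1010E | Tutorials and Revision/Mock PE/PE1_2122/Part2/part2_task3.py | num_divisor_list
-- ===== SOURCE A (Python) =====
-- def num_divisor_list(n):
--     lst = [0]
--     for i in range(1, n + 1):
--         divisor = 0
--         for j in range(1, i + 1):
--             if i % j == 0:
--                 divisor += 1
--         lst.append(divisor)
--     return lst
-- ===== SOURCE B (Python) =====
-- def num_divisor_list(n):
--     counts = [0] * (max(n, 0) + 1)
--     for j in range(1, n + 1):
--         for m in range(j, n + 1, j):
--             counts[m] += 1
--     return counts
-- ===== Notes on version B (the rewrite author's own statement) =====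
-- stated objective: faster
-- what changed: Replaced the per-number trial-division inner loop by a divisor sieve that increments all multiples of each j in one preallocated array.
import Mathlib
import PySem

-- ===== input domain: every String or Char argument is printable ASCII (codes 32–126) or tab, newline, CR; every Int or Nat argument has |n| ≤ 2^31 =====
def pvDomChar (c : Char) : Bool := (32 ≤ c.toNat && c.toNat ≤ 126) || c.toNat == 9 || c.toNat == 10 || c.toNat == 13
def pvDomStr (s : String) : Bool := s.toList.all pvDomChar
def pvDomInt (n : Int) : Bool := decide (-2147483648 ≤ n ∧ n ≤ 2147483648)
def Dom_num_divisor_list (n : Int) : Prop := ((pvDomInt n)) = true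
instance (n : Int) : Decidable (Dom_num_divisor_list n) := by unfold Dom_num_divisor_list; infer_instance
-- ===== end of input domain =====

-- B replaces A's per-number trial division by a divisor sieve over one preallocated array (objective: faster).

-- ===== PORT A =====
def num_divisor_list (n : Int) : List Int :=
  (PySem.List.pyRange 1 (n + 1) 1).foldl
    (fun lst i =>
      lst ++ [(PySem.List.pyRange 1 (i + 1) 1).foldl
        (fun divisor j => if PySem.Int.mod i j = 0 then divisor + 1 else divisor) 0])
    [0]

-- ===== PORT B =====
def num_divisor_list_alt (n : Int) : List Int :=
  (PySem.List.pyRange 1 (n + 1) 1).foldl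
    (fun counts j =>
      (PySem.List.pyRange j (n + 1) j).foldl
        (fun c m => PySem.List.pySetD c m (PySem.List.pyGetD c m 0 + 1)) counts)
    (List.replicate (max n 0 + 1).toNat (0 : Int))

-- ===== PRECONDITION & SPEC =====
def Spec_num_divisor_list (n : Int) (out : List Int) : Prop := out = num_divisor_list_alt n
instance (n : Int) (out : List Int) : Decidable (Spec_num_divisor_list n out) := by unfold Spec_num_divisor_list; infer_instance

-- ===== CLAIM (what is proved, stated in full; the proofs are below) =====
def Claim_equal_num_divisor_list : Prop := ∀ (n : Int), Dom_num_divisor_list n → Spec_num_divisor_list n (num_divisor_list n)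

-- ===== LEMMAS AND PROOFS =====

-- A's inner loop counts the divisors of i among 1..i.
theorem pvA_char (n : Int) :
    num_divisor_list n =
      0 :: (PySem.List.pyRange 1 (n + 1) 1).map
        (fun i => ((PySem.List.pyRange 1 (i + 1) 1).countP (fun j => decide (j ∣ i)) : Int)) := by
  unfold num_divisor_list
  rw [PySem.List.foldl_append_singleton_eq_map]
  simp only [List.singleton_append]
  congr 1
  refine List.map_congr_left (fun i _ => ?_)
  rw [PySem.List.foldl_ite_add_one (p := fun j => PySem.Int.mod i j = 0)]
  simp [PySem.Int.mod_eq_zero_iff_dvd]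

-- The inner sieve pass: length is preserved and each in-range entry gains the count of its index in ms.
theorem pvInner_len (ms c : List Int) :
    (ms.foldl (fun c m => PySem.List.pySetD c m (PySem.List.pyGetD c m 0 + 1)) c).length = c.length := by
  induction ms generalizing c with
  | nil => rfl
  | cons m ms ih => simp [List.foldl_cons, ih, PySem.List.length_pySetD]

theorem pvInner_getD (ms c : List Int) (i : Nat) (hi : i < c.length)
    (hm : ∀ m ∈ ms, 0 ≤ m ∧ m.toNat < c.length) :
    PySem.List.pyGetD (ms.foldl (fun c m => PySem.List.pySetD c m (PySem.List.pyGetD c m 0 + 1)) c) (i : Int) 0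
      = PySem.List.pyGetD c (i : Int) 0 + (ms.count (i : Int) : Int) := by
  induction ms generalizing c with
  | nil => simp
  | cons m ms ih =>
    obtain ⟨hm0, hmlen⟩ := hm m (List.mem_cons_self ..)
    have hcast : m = ((m.toNat : Nat) : Int) := by omega
    rw [List.foldl_cons, ih _ (by rw [PySem.List.length_pySetD]; exact hi)
        (fun x hx => by rw [PySem.List.length_pySetD]; exact hm x (List.mem_cons_of_mem _ hx))]
    rw [hcast, PySem.List.pyGetD_pySetD_natCast _ _ _ _ _ hmlen]
    by_cases h : i = m.toNat
    · have he : ((i : Int)) = m := by omega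
      simp [h]
      ring
    · have hne2 : ((max m 0 : Int) == (i : Int)) = false := by simp; omega
      simp [h, List.count_cons, hne2]

-- The whole sieve: entry i ends as the number of outer indices j whose multiple list hits i.
theorem pvSieve_getD (n : Int) (J : List Int) (c : List Int) (hc : c.length = (n + 1).toNat)
    (hJ : ∀ j ∈ J, 1 ≤ j) (i : Nat) (hi : i < c.length) :
    PySem.List.pyGetD
      (J.foldl (fun counts j =>
        (PySem.List.pyRange j (n + 1) j).foldl
          (fun c m => PySem.List.pySetD c m (PySem.List.pyGetD c m 0 + 1)) counts) c) (i : Int) 0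
      = PySem.List.pyGetD c (i : Int) 0
        + (J.countP (fun j => decide ((i : Int) ∈ PySem.List.pyRange j (n + 1) j)) : Int) := by
  induction J generalizing c with
  | nil => simp
  | cons j J ih =>
    have hj : 1 ≤ j := hJ j (List.mem_cons_self ..)
    have hmem : ∀ m ∈ PySem.List.pyRange j (n + 1) j, 0 ≤ m ∧ m.toNat < c.length := by
      intro m hm
      rw [PySem.List.mem_pyRange_iff_of_pos (by omega)] at hm
      constructor
      · omega
      · omega
    rw [List.foldl_cons, ih _ (by rw [pvInner_len]; exact hc)
        (fun x hx => hJ x (List.mem_cons_of_mem _ hx)) (by rw [pvInner_len]; exact hi),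
      pvInner_getD _ _ _ hi hmem]
    have hnodup : (PySem.List.pyRange j (n + 1) j).Nodup := by
      rw [PySem.List.pyRange_of_pos _ _ (by omega)]
      exact (List.nodup_range).map (fun a b hab => by
        have : j * (a : Int) = j * b := by omega
        have := mul_left_cancel₀ (by omega : (j : Int) ≠ 0) this
        exact_mod_cast this)
    by_cases h : (i : Int) ∈ PySem.List.pyRange j (n + 1) j
    · rw [List.count_eq_one_of_mem hnodup h]
      simp [h]
      ring
    · rw [List.count_eq_zero_of_not_mem h]
      simp [h]

theorem pvOuter_len (n : Int) (J c : List Int) :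
    (J.foldl (fun counts j =>
      (PySem.List.pyRange j (n + 1) j).foldl
        (fun c m => PySem.List.pySetD c m (PySem.List.pyGetD c m 0 + 1)) counts) c).length = c.length := by
  induction J generalizing c with
  | nil => rfl
  | cons j J ih => simp [List.foldl_cons, ih, pvInner_len]

-- Per-row equality: for 1 ≤ i ≤ n, the j∈1..n that hit i in the sieve are exactly the divisors j∈1..i.
theorem pvRow_eq (n i : Int) (h1 : 1 ≤ i) (h2 : i ≤ n) :
    ((PySem.List.pyRange 1 (n + 1) 1).countP (fun j => decide (i ∈ PySem.List.pyRange j (n + 1) j)))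
      = ((PySem.List.pyRange 1 (i + 1) 1).countP (fun j => decide (j ∣ i))) := by
  rw [PySem.List.pyRange_one_append 1 (i + 1) (n + 1) (by omega) (by omega), List.countP_append]
  have hright : ((PySem.List.pyRange (i + 1) (n + 1) 1).countP
      (fun j => decide (i ∈ PySem.List.pyRange j (n + 1) j))) = 0 := by
    rw [List.countP_eq_zero]
    intro j hj
    rw [PySem.List.mem_pyRange_one] at hj
    simp only [decide_eq_true_eq]
    rw [PySem.List.mem_pyRange_iff_of_pos (by omega)]
    omega
  rw [hright, Nat.add_zero]
  refine List.countP_congr (fun j hj => ?_)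
  rw [PySem.List.mem_pyRange_one] at hj
  simp only [decide_eq_true_eq]
  rw [PySem.List.mem_pyRange_iff_of_pos (by omega)]
  constructor
  · rintro ⟨-, -, hd⟩
    have : j ∣ (i - j) + j := Dvd.dvd.add hd dvd_rfl
    simpa using this
  · intro hd
    exact ⟨by omega, by omega, (Dvd.dvd.sub hd dvd_rfl)⟩

-- ===== VERDICT (by name: the statement is the Claim_ definition above) =====
theorem num_divisor_list_spec : Claim_equal_num_divisor_list := by
  intro n _
  unfold Spec_num_divisor_list
  by_cases hn : n < 0
  · have he : PySem.List.pyRange 1 (n + 1) 1 = [] := PySem.List.pyRange_one_eq_nil (by omega)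
    have hr : (max n 0 + 1).toNat = 1 := by omega
    unfold num_divisor_list num_divisor_list_alt
    rw [he, hr]
    rfl
  · rw [not_lt] at hn
    rw [pvA_char]
    have hlenB : (num_divisor_list_alt n).length = (n + 1).toNat := by
      unfold num_divisor_list_alt
      rw [pvOuter_len n, List.length_replicate]
      omega
    have hrep : (List.replicate (max n 0 + 1).toNat (0 : Int)).length = (n + 1).toNat := by
      simp; omega
    refine List.ext_getElem ?_ (fun i hiA hiB => ?_)
    · simp [hlenB, PySem.List.length_pyRange_one]
      omega
    · have hiB' : i < (n + 1).toNat := by omega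
      have hB : (num_divisor_list_alt n)[i] =
          PySem.List.pyGetD (num_divisor_list_alt n) (i : Int) 0 := by
        rw [PySem.List.pyGetD_natCast, List.getD_eq_getElem _ _ (by omega)]
      rw [hB]
      unfold num_divisor_list_alt
      rw [pvSieve_getD n _ _ hrep
          (fun j hj => by rw [PySem.List.mem_pyRange_one] at hj; omega) i (by omega)]
      rcases Nat.eq_zero_or_pos i with hi0 | hipos
      · subst hi0
        have : ((PySem.List.pyRange 1 (n + 1) 1).countP
            (fun j => decide ((0 : Int) ∈ PySem.List.pyRange j (n + 1) j))) = 0 := by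
          rw [List.countP_eq_zero]
          intro j hj
          rw [PySem.List.mem_pyRange_one] at hj
          simp only [decide_eq_true_eq]
          rw [PySem.List.mem_pyRange_iff_of_pos (by omega)]
          omega
        have hr : (max n 0 + 1).toNat = n.toNat + 1 := by omega
        simp [this, hr, PySem.List.pyGetD_zero]
      · have hi1 : 1 ≤ (i : Int) := by omega
        have hin : (i : Int) ≤ n := by omega
        simp only [List.getElem_cons]
        split
        · omega
        · rw [List.getElem_map, PySem.List.getElem_pyRange_one]
          rw [PySem.List.pyGetD_natCast, List.getD_eq_getElem _ _ (by simp; omega)]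
          rw [List.getElem_replicate]
          rw [pvRow_eq n (i : Int) hi1 hin]
          have : (1 : Int) + (i - 1 : Nat) = (i : Int) := by omega
          rw [this]
          ring
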